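-- pv_equiv track=rewrite | github.com/avishais/gazebo_adaptive_hand_simulator | src/object_state_publisher.py | getNameOrder
-- ===== SOURCE A (Python) =====
-- def getNameOrder(names, str):
--
--     idx = -1
--     for i, name in enumerate(names):
--         if name == str:
--             idx = i
--         if name[-9:] == str:
--             idx = i
--
--     return idx
-- ===== SOURCE B (Python) =====
-- def getNameOrder(names, str):
--     for i in range(len(names) - 1, -1, -1):
--         name = names[i]
--         if name == str or name[-9:] == str:
--             return i
--     return -1
-- ===== Notes on version B (the rewrite author's own statement) =====
-- stated objective: idiomatic
-- what changed: Replaces A's forward full scan that keeps overwriting a last-match accumulator with a backward scan that returns the first (i.e. last) matching index immediately.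
import Mathlib
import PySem

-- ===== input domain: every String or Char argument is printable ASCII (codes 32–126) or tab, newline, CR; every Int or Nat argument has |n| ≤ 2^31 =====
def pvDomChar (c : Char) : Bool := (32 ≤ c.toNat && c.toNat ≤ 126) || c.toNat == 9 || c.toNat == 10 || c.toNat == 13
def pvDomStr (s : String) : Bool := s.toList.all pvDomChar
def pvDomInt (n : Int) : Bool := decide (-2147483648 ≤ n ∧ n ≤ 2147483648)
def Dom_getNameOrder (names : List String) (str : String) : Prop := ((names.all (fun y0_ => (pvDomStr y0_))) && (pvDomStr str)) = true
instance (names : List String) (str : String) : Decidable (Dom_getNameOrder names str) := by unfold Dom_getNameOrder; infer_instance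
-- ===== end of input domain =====

-- B replaces A's forward scan with a last-match accumulator by a backward scan returning
-- the first (= last) matching index immediately (idiomatic early-exit search).


-- ===== PORT A =====
-- for i, name in enumerate(names): two successive ifs overwriting idx
def getNameOrderAux (str : String) : List String → Nat → Int → Int
  | [], _, idx => idx
  | name :: rest, i, idx =>
      let idx1 := if name == str then (i : Int) else idx
      let idx2 := if PySem.Str.slice name (some (-9)) none == str then (i : Int) else idx1
      getNameOrderAux str rest (i + 1) idx2

def getNameOrder (names : List String) (str : String) : Int :=
  getNameOrderAux str names 0 (-1)

-- ===== PORT B =====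
-- for i in range(len(names)-1, -1, -1): return i on first match; fall through to -1
def getNameOrderAltAux (names : List String) (str : String) : Nat → Int
  | 0 => -1
  | k + 1 =>
      let name := (PySem.List.pyGet? names (k : Int)).getD ""
      if name == str || PySem.Str.slice name (some (-9)) none == str then (k : Int)
      else getNameOrderAltAux names str k

def getNameOrder_alt (names : List String) (str : String) : Int :=
  getNameOrderAltAux names str names.length

-- ===== PRECONDITION & SPEC =====
def Spec_getNameOrder (names : List String) (str : String) (out : Int) : Prop := out = getNameOrder_alt names str
instance (names : List String) (str : String) (out : Int) : Decidable (Spec_getNameOrder names str out) := by unfold Spec_getNameOrder; infer_instance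

-- ===== CLAIM (what is proved, stated in full; the proofs are below) =====
def Claim_equal_getNameOrder : Prop := ∀ (names : List String) (str : String), Dom_getNameOrder names str → Spec_getNameOrder names str (getNameOrder names str)

-- ===== LEMMAS AND PROOFS =====

-- the element test both programs perform
def pvCond (str name : String) : Bool :=
  name == str || PySem.Str.slice name (some (-9)) none == str

theorem getNameOrderAux_step (str name : String) (rest : List String) (i : Nat) (idx : Int) :
    getNameOrderAux str (name :: rest) i idx =
      getNameOrderAux str rest (i + 1) (if pvCond str name then (i : Int) else idx) := by
  simp only [getNameOrderAux, pvCond]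
  by_cases h1 : name == str <;> by_cases h2 : PySem.Str.slice name (some (-9)) none == str <;>
    simp [h1, h2]

theorem getNameOrderAux_snoc (str x : String) (l : List String) (i : Nat) (idx : Int) :
    getNameOrderAux str (l ++ [x]) i idx =
      if pvCond str x then ((i : Int) + l.length) else getNameOrderAux str l i idx := by
  induction l generalizing i idx with
  | nil =>
      simp only [List.nil_append, getNameOrderAux_step, getNameOrderAux]
      split <;> simp
  | cons y ys ih =>
      simp only [List.cons_append, getNameOrderAux_step, ih]
      split <;> [skip; rfl]
      simp [List.length_cons]
      ring

theorem getNameOrderAltAux_prefix (str x : String) (l : List String) (k : Nat) (hk : k ≤ l.length) :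
    getNameOrderAltAux (l ++ [x]) str k = getNameOrderAltAux l str k := by
  induction k with
  | zero => rfl
  | succ k ih =>
      have hk' : k < l.length := hk
      simp only [getNameOrderAltAux, PySem.List.pyGet?_natCast,
        List.getElem?_append_left hk', ih (Nat.le_of_lt hk')]

theorem getNameOrder_alt_snoc (str x : String) (l : List String) :
    getNameOrder_alt (l ++ [x]) str =
      if pvCond str x then (l.length : Int) else getNameOrder_alt l str := by
  simp only [getNameOrder_alt, List.length_append, List.length_cons, List.length_nil]
  have : l.length + (0 + 1) = l.length + 1 := by omega
  rw [this]
  simp only [getNameOrderAltAux, PySem.List.pyGet?_natCast]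
  rw [List.getElem?_append_right (Nat.le_refl _)]
  rw [getNameOrderAltAux_prefix str x l l.length (Nat.le_refl _)]
  simp [pvCond]

theorem getNameOrder_eq (str : String) (names : List String) :
    getNameOrder names str = getNameOrder_alt names str := by
  induction names using List.reverseRecOn with
  | nil => rfl
  | append_singleton l x ih =>
      rw [getNameOrder_alt_snoc]
      show getNameOrderAux str (l ++ [x]) 0 (-1) = _
      rw [getNameOrderAux_snoc,
        show getNameOrderAux str l 0 (-1) = getNameOrder l str from rfl, ih]
      norm_num

-- ===== VERDICT (by name: the statement is the Claim_ definition above) =====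
theorem getNameOrder_spec : Claim_equal_getNameOrder := by
  intro names str _
  exact getNameOrder_eq str names
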